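-- pv_equiv track=rewrite | github.com/Freeseer/freeseer | src/freeseer/framework/rss_parser.py | _remove_tag_indicators
-- ===== SOURCE A (Python) =====
-- def _remove_tag_indicators(string):
--     inside_tag = False
--     final_string = ""
--     for letter in string:
--         if letter == "<":
--             inside_tag = True
--         elif letter == ">":
--             inside_tag = False
--         else:
--             if not inside_tag:
--                 final_string += letter
--     return final_string
-- ===== SOURCE B (Python) =====
-- def _remove_tag_indicators(string):
--     # Chunk-based: jump between '<'/'>' with str.find, copy whole slices
--     # outside tags, then strip stray '>' in one pass.
--     out = []
--     i = 0
--     while True: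
--         j = string.find('<', i)
--         if j == -1:
--             out.append(string[i:])
--             break
--         out.append(string[i:j])
--         k = string.find('>', j + 1)
--         if k == -1:
--             break
--         i = k + 1
--     return ''.join(out).replace('>', '')
-- ===== Notes on version B (the rewrite author's own statement) =====
-- stated objective: faster
-- what changed: Replaces the per-character inside_tag flag loop with chunk copying: str.find jumps between each '<' and its closing '>', whole slices outside tags are appended, and stray '>' are stripped in one final replace (C-level find/slice/replace instead of a Python-level loop over every character).
import Mathlib
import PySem

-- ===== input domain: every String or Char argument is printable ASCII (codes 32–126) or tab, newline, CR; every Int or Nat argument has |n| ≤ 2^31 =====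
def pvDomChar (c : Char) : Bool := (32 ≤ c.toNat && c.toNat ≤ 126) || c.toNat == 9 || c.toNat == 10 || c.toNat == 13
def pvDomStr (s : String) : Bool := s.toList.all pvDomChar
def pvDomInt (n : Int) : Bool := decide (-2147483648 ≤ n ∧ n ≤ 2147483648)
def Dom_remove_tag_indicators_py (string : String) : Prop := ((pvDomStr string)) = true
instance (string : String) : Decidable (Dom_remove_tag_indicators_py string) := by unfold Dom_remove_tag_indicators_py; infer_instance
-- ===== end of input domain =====

-- B replaces the per-character flag loop with chunk copying that jumps between
-- '<' and '>' via find, then strips stray '>' in one final pass (objective: alternative).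


-- ===== PORT A =====
-- A-side helper: the loop body (inside_tag, final_string) -> next state
def stepA (st : Bool × List Char) (letter : Char) : Bool × List Char :=
  if letter = '<' then (true, st.2)
  else if letter = '>' then (false, st.2)
  else if !st.1 then (st.1, st.2 ++ [letter]) else st

-- literal transliteration: fold the loop body over the characters, return final_string
def remove_tag_indicators_py (string : String) : String :=
  String.mk (string.toList.foldl stepA (false, [])).2

-- ===== PORT B =====
-- the while-True loop of Source B: out accumulates the chunks ''.join concatenates
def bLoop (s : List Char) (i : Nat) (out : List (List Char)) : List (List Char) :=
  match (s.drop i).findIdx? (· = '<') with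
  | none => out ++ [s.drop i]                     -- j == -1: append string[i:], break
  | some m =>
    match h2 : (s.drop (i + m + 1)).findIdx? (· = '>') with
    | none => out ++ [(s.drop i).take m]          -- k == -1: break (chunk already appended)
    | some m' => bLoop s (i + m + 1 + m' + 1) (out ++ [(s.drop i).take m])
termination_by s.length + 1 - i
decreasing_by
  have hm' : m' < (s.drop (i + m + 1)).length := (List.findIdx?_eq_some_iff_getElem.mp h2).1
  simp [List.length_drop] at hm'
  omega

-- ''.join(out).replace('>', '') — replace of a single char by '' deletes each
-- occurrence, i.e. a filter (hand port, exact for this old/new pair)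
def remove_tag_indicators_py_alt (string : String) : String :=
  String.mk (((bLoop string.toList 0 []).flatten).filter (fun c => c ≠ '>'))

-- ===== PRECONDITION & SPEC =====
def Spec_remove_tag_indicators_py (string : String) (out : String) : Prop := out = remove_tag_indicators_py_alt string
instance (string : String) (out : String) : Decidable (Spec_remove_tag_indicators_py string out) := by unfold Spec_remove_tag_indicators_py; infer_instance

-- ===== CLAIM (what is proved, stated in full; the proofs are below) =====
def Claim_equal_remove_tag_indicators_py : Prop := ∀ (string : String), Dom_remove_tag_indicators_py string → Spec_remove_tag_indicators_py string (remove_tag_indicators_py string)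

-- ===== LEMMAS AND PROOFS =====

-- reference two-state machine: the characters A keeps
def tagSpec (b : Bool) : List Char → List Char
  | [] => []
  | c :: cs =>
    if c = '<' then tagSpec true cs
    else if c = '>' then tagSpec false cs
    else if b then tagSpec b cs else c :: tagSpec b cs

theorem foldlA_eq_tagSpec (cs : List Char) : ∀ (b : Bool) (acc : List Char),
    (cs.foldl stepA (b, acc)).2 = acc ++ tagSpec b cs := by
  induction cs with
  | nil => intro b acc; simp [tagSpec]
  | cons c cs ih =>
    intro b acc
    rw [List.foldl_cons]
    by_cases h1 : c = '<'
    · rw [show stepA (b, acc) c = (true, acc) by simp [stepA, h1]]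
      simp [h1, tagSpec, ih]
    · by_cases h2 : c = '>'
      · rw [show stepA (b, acc) c = (false, acc) by simp [stepA, h1, h2]]
        simp [h2, tagSpec, ih]
      · cases b with
        | false =>
          rw [show stepA (false, acc) c = (false, acc ++ [c]) by simp [stepA, h1, h2]]
          simp [h1, h2, tagSpec, ih]
        | true =>
          rw [show stepA (true, acc) c = (true, acc) by simp [stepA, h1, h2]]
          simp [h2, tagSpec, ih]

theorem tagSpec_false_of_no_lt (xs : List Char) (h : '<' ∉ xs) :
    tagSpec false xs = xs.filter (fun c => c ≠ '>') := by
  induction xs with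
  | nil => simp [tagSpec]
  | cons c cs ih =>
    simp only [List.mem_cons, not_or] at h
    have hc : c ≠ '<' := fun e => h.1 e.symm
    by_cases h2 : c = '>'
    · simp [tagSpec, hc, h2, ih h.2]
    · simp [tagSpec, hc, h2, ih h.2]

theorem tagSpec_false_append_lt (xs ys : List Char) (h : '<' ∉ xs) :
    tagSpec false (xs ++ '<' :: ys) = xs.filter (fun c => c ≠ '>') ++ tagSpec true ys := by
  induction xs with
  | nil => simp [tagSpec]
  | cons c cs ih =>
    simp only [List.mem_cons, not_or] at h
    have hc : c ≠ '<' := fun e => h.1 e.symm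
    by_cases h2 : c = '>'
    · simp [tagSpec, hc, h2, ih h.2]
    · simp [tagSpec, hc, h2, ih h.2]

theorem tagSpec_true_of_no_gt (xs : List Char) (h : '>' ∉ xs) :
    tagSpec true xs = [] := by
  induction xs with
  | nil => simp [tagSpec]
  | cons c cs ih =>
    simp only [List.mem_cons, not_or] at h
    have hc : c ≠ '>' := fun e => h.1 e.symm
    by_cases h1 : c = '<'
    · simp [tagSpec, h1, ih h.2]
    · simp [tagSpec, h1, hc, ih h.2]

theorem tagSpec_true_append_gt (xs ys : List Char) (h : '>' ∉ xs) :
    tagSpec true (xs ++ '>' :: ys) = tagSpec false ys := by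
  induction xs with
  | nil => simp [tagSpec]
  | cons c cs ih =>
    simp only [List.mem_cons, not_or] at h
    have hc : c ≠ '>' := fun e => h.1 e.symm
    by_cases h1 : c = '<'
    · simp [tagSpec, h1, ih h.2]
    · simp [tagSpec, h1, hc, ih h.2]

theorem bLoop_eq_tagSpec (s : List Char) : ∀ (i : Nat) (out : List (List Char)),
    ((bLoop s i out).flatten).filter (fun c => c ≠ '>')
      = (out.flatten).filter (fun c => c ≠ '>') ++ tagSpec false (s.drop i) := by
  have main : ∀ (fuel i : Nat), s.length + 1 - i < fuel → ∀ (out : List (List Char)),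
      ((bLoop s i out).flatten).filter (fun c => c ≠ '>')
        = (out.flatten).filter (fun c => c ≠ '>') ++ tagSpec false (s.drop i) := by
    intro fuel
    induction fuel with
    | zero => intro i hi; omega
    | succ fuel ih =>
      intro i hi out
      rw [bLoop]
      split
      · next h1 =>
        have hno : '<' ∉ s.drop i := by
          intro hmem
          have := List.findIdx?_eq_none_iff.mp h1 '<' hmem
          simp at this
        simp [tagSpec_false_of_no_lt _ hno]
      · next m h1 =>
        obtain ⟨hmlt, hget, hfirst⟩ := List.findIdx?_eq_some_iff_getElem.mp h1
        simp only [decide_eq_true_eq] at hget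
        have hnoLt : '<' ∉ (s.drop i).take m := by
          intro hmem
          obtain ⟨l, hl, hgl⟩ := List.mem_take_iff_getElem.mp hmem
          have := hfirst l (by omega)
          simp [hgl] at this
        have hdecomp : s.drop i = (s.drop i).take m ++ '<' :: s.drop (i + m + 1) := by
          have he : i + (m + 1) = i + m + 1 := by omega
          conv_lhs => rw [← List.take_append_drop m (s.drop i)]
          rw [List.drop_eq_getElem_cons hmlt, hget, List.drop_drop, he]
        split
        · next h2 =>
          have hno : '>' ∉ s.drop (i + m + 1) := by
            intro hmem
            have := List.findIdx?_eq_none_iff.mp h2 '>' hmem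
            simp at this
          conv_rhs => rw [hdecomp]
          rw [tagSpec_false_append_lt _ _ hnoLt, tagSpec_true_of_no_gt _ hno]
          simp
        · next m' h2 =>
          obtain ⟨hm'lt, hget', hfirst'⟩ := List.findIdx?_eq_some_iff_getElem.mp h2
          simp only [decide_eq_true_eq] at hget'
          have hm'len : m' < s.length - (i + m + 1) := by simpa using hm'lt
          have hnoGt : '>' ∉ (s.drop (i + m + 1)).take m' := by
            intro hmem
            obtain ⟨l, hl, hgl⟩ := List.mem_take_iff_getElem.mp hmem
            have := hfirst' l (by omega)
            simp [hgl] at this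
          have hdecomp2 : s.drop (i + m + 1)
              = (s.drop (i + m + 1)).take m' ++ '>' :: s.drop (i + m + 1 + m' + 1) := by
            have he : i + m + 1 + (m' + 1) = i + m + 1 + m' + 1 := by omega
            conv_lhs => rw [← List.take_append_drop m' (s.drop (i + m + 1))]
            rw [List.drop_eq_getElem_cons hm'lt, hget', List.drop_drop, he]
          rw [ih (i + m + 1 + m' + 1) (by omega)]
          conv_rhs => rw [hdecomp]
          rw [tagSpec_false_append_lt _ _ hnoLt]
          conv_rhs => rw [hdecomp2]
          rw [tagSpec_true_append_gt _ _ hnoGt]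
          simp
  intro i out
  exact main (s.length + 2) i (by omega) out

-- ===== VERDICT (by name: the statement is the Claim_ definition above) =====
theorem remove_tag_indicators_py_spec : Claim_equal_remove_tag_indicators_py := by
  intro string _
  unfold Spec_remove_tag_indicators_py remove_tag_indicators_py remove_tag_indicators_py_alt
  rw [foldlA_eq_tagSpec, bLoop_eq_tagSpec]
  simp
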